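-- pv_equiv track=rewrite | github.com/yuxin101/skills | skills/tyxiang/easy-agent-email/scripts/common.py | _parse_imap_list
-- ===== SOURCE A (Python) =====
-- def _parse_imap_list(raw: str) -> list[str]:
--     items: list[str] = []
--     token: list[str] = []
--     in_quotes = False
--     escape = False
--
--     for char in raw:
--         if escape:
--             token.append(char)
--             escape = False
--             continue
--         if in_quotes:
--             if char == "\\":
--                 escape = True
--             elif char == '"':
--                 in_quotes = False
--             else:
--                 token.append(char)
--             continue
--         if char == '"':
--             in_quotes = True
--             continue
--         if char.isspace():
--             if token:
--                 items.append("".join(token))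
--                 token = []
--             continue
--         token.append(char)
--
--     if token:
--         items.append("".join(token))
--     return items
-- ===== SOURCE B (Python) =====
-- def _parse_imap_list(raw: str) -> list[str]:
--     items: list[str] = []
--     token: list[str] = []
--     i = 0
--     n = len(raw)
--     while i < n:
--         ch = raw[i]
--         if ch == '"':
--             i += 1
--             while i < n:
--                 c = raw[i]
--                 if c == "\\":
--                     if i + 1 < n:
--                         token.append(raw[i + 1])
--                     i += 2
--                 else:
--                     i += 1
--                     if c == '"':
--                         break
--                     token.append(c)
--         elif ch.isspace():
--             if token:
--                 items.append("".join(token))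
--                 token = []
--             i += 1
--         else:
--             token.append(ch)
--             i += 1
--     if token:
--         items.append("".join(token))
--     return items
-- ===== Notes on version B (the rewrite author's own statement) =====
-- stated objective: alternative
-- what changed: Replaces A's single flat scan driven by in_quotes/escape boolean flags with an explicit index walk whose dedicated inner while loop consumes each quoted region (handling backslash escapes by looking ahead one position), so the flag state machine disappears.
import Mathlib
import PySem

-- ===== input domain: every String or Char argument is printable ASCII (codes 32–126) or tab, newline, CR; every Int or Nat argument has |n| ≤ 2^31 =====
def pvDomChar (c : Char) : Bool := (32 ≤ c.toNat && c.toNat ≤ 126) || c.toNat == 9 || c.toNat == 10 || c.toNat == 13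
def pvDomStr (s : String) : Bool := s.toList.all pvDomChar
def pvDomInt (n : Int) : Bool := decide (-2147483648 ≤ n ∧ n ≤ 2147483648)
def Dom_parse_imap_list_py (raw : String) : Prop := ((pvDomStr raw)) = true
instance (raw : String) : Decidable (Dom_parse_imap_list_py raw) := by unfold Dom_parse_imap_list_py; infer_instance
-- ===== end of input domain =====

-- B replaces A's four-variable flag machine (in_quotes/escape booleans in one flat scan) by an
-- explicit index walk with a dedicated inner loop that consumes a whole quoted region; same values
-- on all inputs (objective: alternative decomposition, same cost).

-- ===== PORT A =====
-- A's loop state: (items, token, in_quotes, escape)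
def pvStepA (st : List String × List Char × Bool × Bool) (c : Char) :
    List String × List Char × Bool × Bool :=
  let (items, token, in_quotes, escape) := st
  if escape then (items, token ++ [c], in_quotes, false)
  else if in_quotes then
    if c = '\\' then (items, token, in_quotes, true)
    else if c = '"' then (items, token, false, escape)
    else (items, token ++ [c], in_quotes, escape)
  else if c = '"' then (items, token, true, escape)
  else if PySem.Chars.isspace c then
    (if token = [] then items else items ++ [String.ofList token], [], in_quotes, escape)
  else (items, token ++ [c], in_quotes, escape)

def parse_imap_list_py (raw : String) : List String :=
  let st := raw.toList.foldl pvStepA ([], [], false, false)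
  let (items, token, _, _) := st
  if token = [] then items else items ++ [String.ofList token]

-- ===== PORT B =====
-- inner while loop: consume the quoted region, returning (token so far, remaining chars)
def pvConsumeQuoted (cs : List Char) (token : List Char) : List Char × List Char :=
  match cs with
  | [] => (token, [])
  | c :: rest =>
    if c = '\\' then
      match rest with
      | [] => (token, [])
      | d :: rest' => pvConsumeQuoted rest' (token ++ [d])
    else if c = '"' then (token, rest)
    else pvConsumeQuoted rest (token ++ [c])

theorem pvCQ_nil (tok : List Char) : pvConsumeQuoted [] tok = (tok, []) := rfl

theorem pvCQ_bs_nil (tok : List Char) : pvConsumeQuoted ['\\'] tok = (tok, []) := rfl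

theorem pvCQ_bs (d : Char) (r tok : List Char) :
    pvConsumeQuoted ('\\' :: d :: r) tok = pvConsumeQuoted r (tok ++ [d]) := rfl

theorem pvCQ_quote (r tok : List Char) : pvConsumeQuoted ('"' :: r) tok = (tok, r) := by
  rw [pvConsumeQuoted.eq_def]; simp

theorem pvCQ_other {c : Char} (h1 : ¬ c = '\\') (h2 : ¬ c = '"') (r tok : List Char) :
    pvConsumeQuoted (c :: r) tok = pvConsumeQuoted r (tok ++ [c]) := by
  rw [pvConsumeQuoted.eq_def]; simp [h1, h2]

theorem pvConsumeQuoted_len (cs token : List Char) :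
    (pvConsumeQuoted cs token).2.length ≤ cs.length := by
  induction cs, token using pvConsumeQuoted.induct with
  | case1 token => simp [pvCQ_nil]
  | case2 token => simp [pvCQ_bs_nil]
  | case3 token d rest' ih => rw [pvCQ_bs]; simp; omega
  | case4 token rest' h => simp [pvCQ_quote]
  | case5 token d rest' h1 h2 ih => rw [pvCQ_other h1 h2]; simp; omega

-- outer while loop over the characters
def pvAltLoop (cs : List Char) (items : List String) (token : List Char) : List String :=
  match cs with
  | [] => if token = [] then items else items ++ [String.ofList token]
  | c :: rest =>
    if c = '"' then
      pvAltLoop (pvConsumeQuoted rest token).2 items (pvConsumeQuoted rest token).1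
    else if PySem.Chars.isspace c then
      pvAltLoop rest (if token = [] then items else items ++ [String.ofList token]) []
    else
      pvAltLoop rest items (token ++ [c])
termination_by cs.length
decreasing_by
  · exact Nat.lt_succ_of_le (pvConsumeQuoted_len rest token)
  · simp
  · simp

def parse_imap_list_py_alt (raw : String) : List String :=
  pvAltLoop raw.toList [] []

-- ===== PRECONDITION & SPEC =====
def Spec_parse_imap_list_py (raw : String) (out : List String) : Prop := out = parse_imap_list_py_alt raw
instance (raw : String) (out : List String) : Decidable (Spec_parse_imap_list_py raw out) := by unfold Spec_parse_imap_list_py; infer_instance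

-- ===== CLAIM (what is proved, stated in full; the proofs are below) =====
def Claim_equal_parse_imap_list_py : Prop := ∀ (raw : String), Dom_parse_imap_list_py raw → Spec_parse_imap_list_py raw (parse_imap_list_py raw)

-- ===== LEMMAS AND PROOFS =====

-- "run A's machine from state st over cs, then flush"
def pvRunA (cs : List Char) (st : List String × List Char × Bool × Bool) : List String :=
  let st' := cs.foldl pvStepA st
  let (items, token, _, _) := st'
  if token = [] then items else items ++ [String.ofList token]

theorem pvAL_nil (items : List String) (token : List Char) :
    pvAltLoop [] items token
      = (if token = [] then items else items ++ [String.ofList token]) := by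
  rw [pvAltLoop]

theorem pvAL_quote (r : List Char) (items : List String) (token : List Char) :
    pvAltLoop ('"' :: r) items token
      = pvAltLoop (pvConsumeQuoted r token).2 items (pvConsumeQuoted r token).1 := by
  rw [pvAltLoop.eq_def]; simp

theorem pvAL_space {c : Char} (h1 : ¬ c = '"') (h2 : PySem.Chars.isspace c = true)
    (r : List Char) (items : List String) (token : List Char) :
    pvAltLoop (c :: r) items token
      = pvAltLoop r (if token = [] then items else items ++ [String.ofList token]) [] := by
  rw [pvAltLoop.eq_def]; simp [h1, h2]

theorem pvAL_other {c : Char} (h1 : ¬ c = '"') (h2 : ¬ PySem.Chars.isspace c = true)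
    (r : List Char) (items : List String) (token : List Char) :
    pvAltLoop (c :: r) items token = pvAltLoop r items (token ++ [c]) := by
  rw [pvAltLoop.eq_def]; simp [h1, h2]

theorem pvRunA_quoted (cs : List Char) (items : List String) (token : List Char) :
    pvRunA (pvConsumeQuoted cs token).2 (items, (pvConsumeQuoted cs token).1, false, false)
      = pvRunA cs (items, token, true, false) := by
  induction cs, token using pvConsumeQuoted.induct with
  | case1 token => simp [pvCQ_nil, pvRunA]
  | case2 token => simp [pvCQ_bs_nil, pvRunA, pvStepA]
  | case3 token d rest' ih =>
      rw [pvCQ_bs]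
      have : pvRunA ('\\' :: d :: rest') (items, token, true, false)
          = pvRunA rest' (items, token ++ [d], true, false) := by
        simp [pvRunA, pvStepA]
      rw [this]; exact ih
  | case4 token rest' h =>
      rw [pvCQ_quote]
      simp [pvRunA, pvStepA]
  | case5 token d rest' h1 h2 ih =>
      rw [pvCQ_other h1 h2]
      have : pvRunA (d :: rest') (items, token, true, false)
          = pvRunA rest' (items, token ++ [d], true, false) := by
        simp [pvRunA, pvStepA, h1, h2]
      rw [this]; exact ih

theorem pvAltLoop_eq_runA (cs : List Char) (items : List String) (token : List Char) :
    pvAltLoop cs items token = pvRunA cs (items, token, false, false) := by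
  induction cs, items, token using pvAltLoop.induct with
  | case1 items => simp [pvAL_nil, pvRunA]
  | case2 items token h => simp [pvAL_nil, pvRunA, h]
  | case3 items token rest' ih =>
      rw [pvAL_quote]
      rw [ih, pvRunA_quoted]
      simp [pvRunA, pvStepA]
  | case4 items token d rest' h1 h2 ih =>
      rw [pvAL_space h1 h2]
      simp only [dite_eq_ite] at ih
      rw [ih]
      simp [pvRunA, pvStepA, h1, h2]
  | case5 items token d rest' h1 h2 ih =>
      rw [pvAL_other h1 h2]
      rw [ih]
      simp [pvRunA, pvStepA, h1, h2]

-- ===== VERDICT (by name: the statement is the Claim_ definition above) =====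
theorem parse_imap_list_py_spec : Claim_equal_parse_imap_list_py := by
  intro raw _
  unfold Spec_parse_imap_list_py parse_imap_list_py parse_imap_list_py_alt
  rw [pvAltLoop_eq_runA]
  rfl
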